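-- pv_equiv track=rewrite | github.com/ameya98/ActionAngleNetworks | supercloud/sweep_main.py | get_updates_at_index
-- ===== SOURCE A (Python) =====
-- import itertools
-- from typing import Any, Dict, Optional, Sequence
--
-- def get_updates_at_index(
--     index: Optional[int], sweep: Dict[str, Sequence[Any]]
-- ) -> Dict[str, Any]:
--     """Get the config updates at the given index."""
--     if index is None:
--         return {}
--
--     values = None
--     for current_index, current_values in enumerate(itertools.product(*sweep.values())):
--         if current_index != index:
--             continue
--
--         values = current_values
--         break
--
--     if values is None:
--         raise ValueError("Index is too large for chosen sweep.")
--
--     keys = list(sweep.keys())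
--     return dict(zip(keys, values))
-- ===== SOURCE B (Python) =====
-- from typing import Any, Dict, Optional, Sequence
--
--
-- def get_updates_at_index(
--     index: Optional[int], sweep: Dict[str, Sequence[Any]]
-- ) -> Dict[str, Any]:
--     """Get the config updates at the given index (mixed-radix decomposition)."""
--     if index is None:
--         return {}
--
--     rem = index
--     rev = []
--     for key, values in reversed(list(sweep.items())):
--         rem, pos = divmod(rem, len(values))
--         rev.append((key, values[pos]))
--
--     if rem != 0:
--         raise ValueError("Index is too large for chosen sweep.")
--
--     return dict(reversed(rev))
-- ===== Notes on version B (the rewrite author's own statement) =====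
-- stated objective: faster
-- what changed: Replaces the linear scan over itertools.product (materialising every combination up to the index) with a direct mixed-radix decomposition of the index by division/modulo over the sequence lengths.
import Mathlib
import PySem

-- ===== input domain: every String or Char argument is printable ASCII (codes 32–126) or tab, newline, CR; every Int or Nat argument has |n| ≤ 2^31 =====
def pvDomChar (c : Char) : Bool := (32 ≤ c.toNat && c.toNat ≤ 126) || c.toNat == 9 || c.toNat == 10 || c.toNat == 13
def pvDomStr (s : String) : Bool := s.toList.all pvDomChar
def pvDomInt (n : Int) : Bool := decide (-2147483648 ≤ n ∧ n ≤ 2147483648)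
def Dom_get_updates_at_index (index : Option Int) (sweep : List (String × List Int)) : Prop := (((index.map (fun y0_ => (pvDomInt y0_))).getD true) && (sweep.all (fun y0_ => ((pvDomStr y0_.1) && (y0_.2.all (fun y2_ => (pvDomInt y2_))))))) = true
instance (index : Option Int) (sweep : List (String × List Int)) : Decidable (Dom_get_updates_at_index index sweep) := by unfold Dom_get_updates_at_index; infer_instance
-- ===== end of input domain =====

-- B replaces A's linear scan over the cartesian product with a direct mixed-radix
-- decomposition of the index (division/modulo over the sequence lengths).

-- ===== PORT A =====
-- itertools.product(*sweep.values()) in row-major order (last sequence varies fastest)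
def pvProd : List (List Int) → List (List Int)
  | [] => [[]]
  | vs :: rest => vs.flatMap (fun v => (pvProd rest).map (fun t => v :: t))

def get_updates_at_index (index : Option Int) (sweep : List (String × List Int)) : List (String × Int) :=
  match index with
  | none => []
  | some i =>
    -- enumerate(itertools.product(...)), take the first entry whose index equals i
    let values := ((PySem.List.enumerate (pvProd (sweep.map (·.2))) 0).find?
        (fun p => p.1 == i)).map (·.2)
    match values with
    | none => []  -- Python: raise ValueError("Index is too large ..."); excluded by Pre_
    | some vs => (sweep.map (·.1)).zip vs

-- ===== PORT B =====
def get_updates_at_index_alt (index : Option Int) (sweep : List (String × List Int)) : List (String × Int) :=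
  match index with
  | none => []
  | some i =>
    let st := sweep.reverse.foldl
      (fun (st : Int × List (String × Int)) kv =>
        (PySem.Int.floordiv st.1 (kv.2.length : Int),
         st.2 ++ [(kv.1, PySem.List.pyGetD kv.2 (PySem.Int.mod st.1 (kv.2.length : Int)) 0)]))
      (i, [])
    if st.1 ≠ 0 then []  -- Python: raise ValueError; excluded by Pre_
    else st.2.reverse

-- ===== PRECONDITION & SPEC =====
-- Pre_ excludes exactly the inputs where A raises ValueError: an out-of-range
-- (or negative) index for the product of the sweep's sequence lengths.
def Pre_get_updates_at_index (index : Option Int) (sweep : List (String × List Int)) : Prop :=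
  index.all (fun i => decide (0 ≤ i ∧ i < (sweep.map (fun kv => (kv.2.length : Int))).prod)) = true

instance (index : Option Int) (sweep : List (String × List Int)) : Decidable (Pre_get_updates_at_index index sweep) := by unfold Pre_get_updates_at_index; infer_instance

def pvWitness_get_updates_at_index : Option Int × (List (String × List Int)) :=
  (some 3, [("a", [10, 20]), ("b", [1, 2, 3])])

def Spec_get_updates_at_index (index : Option Int) (sweep : List (String × List Int)) (out : List (String × Int)) : Prop := out = get_updates_at_index_alt index sweep
instance (index : Option Int) (sweep : List (String × List Int)) (out : List (String × Int)) : Decidable (Spec_get_updates_at_index index sweep out) := by unfold Spec_get_updates_at_index; infer_instance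

-- ===== CLAIM (what is proved, stated in full; the proofs are below) =====
def Claim_equal_get_updates_at_index : Prop := ∀ (index : Option Int) (sweep : List (String × List Int)), Dom_get_updates_at_index index sweep → Pre_get_updates_at_index index sweep → Spec_get_updates_at_index index sweep (get_updates_at_index index sweep)

-- ===== LEMMAS AND PROOFS =====

-- product of the sequence lengths
def prodLens (l : List (String × List Int)) : Nat := (l.map (fun kv => kv.2.length)).prod

def prodL (ls : List (List Int)) : Nat := (ls.map List.length).prod

-- the mixed-radix value tuple at (Nat) index i
def mixVals : Nat → List (List Int) → List Int
  | _, [] => []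
  | i, vs :: rest => vs.getD (i / prodL rest) 0 :: mixVals (i % prodL rest) rest

-- the mixed-radix keyed result at (Nat) index i
def mixN : Nat → List (String × List Int) → List (String × Int)
  | _, [] => []
  | i, (k, vs) :: rest => (k, vs.getD (i / prodLens rest) 0) :: mixN (i % prodLens rest) rest

theorem pvProd_length (ls : List (List Int)) : (pvProd ls).length = prodL ls := by
  induction ls with
  | nil => simp [pvProd, prodL]
  | cons vs rest ih => simp [pvProd, prodL, List.length_flatMap, ih]

theorem flat_getD (g : List (List Int)) (vs : List Int) (i : Nat)
    (h : i < vs.length * g.length) :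
    (vs.flatMap (fun v => g.map (fun t => v :: t))).getD i [] =
      vs.getD (i / g.length) 0 :: g.getD (i % g.length) [] := by
  induction vs generalizing i with
  | nil => simp at h
  | cons v vs ih =>
    simp only [List.flatMap_cons]
    have h2 : i < vs.length * g.length + g.length := by
      simp only [List.length_cons, Nat.succ_mul] at h; omega
    by_cases hlt : i < g.length
    · rw [List.getD_append _ _ _ _ (by simpa using hlt)]
      rw [Nat.div_eq_of_lt hlt, Nat.mod_eq_of_lt hlt]
      simp [List.getD, List.getElem?_map]
      cases hg : g[i]? with
      | none => rw [List.getElem?_eq_none_iff] at hg; omega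
      | some t => simp
    · rw [not_lt] at hlt
      rw [List.getD_append_right _ _ _ _ (by simpa using hlt)]
      simp only [List.length_map]
      rw [ih (i - g.length) (by omega)]
      have hg : 0 < g.length := by
        rcases Nat.eq_zero_or_pos g.length with h0 | h0
        · rw [h0, Nat.mul_zero] at h2; omega
        · exact h0
      rw [Nat.div_eq_sub_div hg hlt, Nat.mod_eq_sub_mod hlt]
      simp [List.getD]

theorem pvProd_getD (ls : List (List Int)) (i : Nat) (h : i < prodL ls) :
    (pvProd ls).getD i [] = mixVals i ls := by
  induction ls generalizing i with
  | nil => simp [prodL] at h; simp [pvProd, mixVals, h]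
  | cons vs rest ih =>
    have hP : i < vs.length * prodL rest := by
      simpa [prodL] using h
    have hpr : 0 < prodL rest := by
      rcases Nat.eq_zero_or_pos (prodL rest) with h0 | h0
      · rw [h0, Nat.mul_zero] at hP; omega
      · exact h0
    rw [pvProd, flat_getD _ _ _ (by rw [pvProd_length]; exact hP), pvProd_length]
    rw [mixVals, ih _ (Nat.mod_lt _ hpr)]

theorem zip_mixVals (l : List (String × List Int)) (i : Nat) :
    (l.map (·.1)).zip (mixVals i (l.map (·.2))) = mixN i l := by
  induction l generalizing i with
  | nil => simp [mixVals, mixN]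
  | cons kv rest ih =>
    obtain ⟨k, vs⟩ := kv
    simp only [List.map_cons, mixVals, mixN, List.zip_cons_cons, ih]
    have : prodL (rest.map (·.2)) = prodLens rest := by
      simp [prodL, prodLens, List.map_map]; rfl
    rw [this]

theorem lens_pos (l : List (String × List Int)) (h : 0 < prodLens l) :
    ∀ kv ∈ l, 0 < kv.2.length := by
  intro kv hkv
  rcases Nat.eq_zero_or_pos kv.2.length with h0 | h0
  · exfalso
    have : (0 : Nat) ∈ l.map (fun kv => kv.2.length) := List.mem_map.mpr ⟨kv, hkv, h0⟩
    rw [prodLens, List.prod_eq_zero this] at h; omega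
  · exact h0

theorem prod_cast (l : List (String × List Int)) :
    (l.map (fun kv => (kv.2.length : Int))).prod = ((prodLens l : Nat) : Int) := by
  rw [prodLens, Nat.cast_list_prod, List.map_map]; rfl

theorem find_enum (xs : List (List Int)) (s i : Int) (h1 : s ≤ i) (h2 : i < s + xs.length) :
    (PySem.List.enumerate xs s).find? (fun p => p.1 == i) =
      some (i, xs.getD (i - s).toNat []) := by
  induction xs generalizing s with
  | nil => simp at h2; omega
  | cons x xs ih =>
    rw [PySem.List.enumerate_cons, List.find?_cons]
    by_cases hs : s = i
    · simp [hs, List.getD]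
    · have hb : (s == i) = false := by simpa using hs
      rw [hb]
      rw [ih (s + 1) (by omega) (by simp at h2 ⊢; omega)]
      have hn : (i - s).toNat = (i - (s + 1)).toNat + 1 := by omega
      simp [hn, List.getD]

theorem foldrB (l : List (String × List Int)) (n : Nat) (acc : List (String × Int))
    (hpos : ∀ kv ∈ l, 0 < kv.2.length) :
    l.foldr (fun kv (st : Int × List (String × Int)) =>
        (PySem.Int.floordiv st.1 (kv.2.length : Int),
         st.2 ++ [(kv.1, PySem.List.pyGetD kv.2 (PySem.Int.mod st.1 (kv.2.length : Int)) 0)]))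
      ((n : Int), acc)
    = ((((n / prodLens l : Nat)) : Int), acc ++ (mixN (n % prodLens l) l).reverse) := by
  induction l generalizing acc with
  | nil => simp [prodLens, mixN]
  | cons kv rest ih =>
    obtain ⟨k, vs⟩ := kv
    have hrest : ∀ p ∈ rest, 0 < p.2.length := fun p hp => hpos p (List.mem_cons_of_mem _ hp)
    have hPr : 0 < prodLens rest := by
      rw [prodLens]
      exact List.prod_pos (by
        intro x hx
        obtain ⟨p, hp, rfl⟩ := List.mem_map.mp hx
        exact hrest p hp)
    simp only [List.foldr_cons, ih acc hrest]
    rw [PySem.Int.floordiv_natCast, PySem.Int.mod_natCast]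
    have hPl : prodLens ((k, vs) :: rest) = vs.length * prodLens rest := by
      simp [prodLens]
    rw [Prod.mk.injEq]
    refine ⟨?_, ?_⟩
    · rw [hPl, Nat.div_div_eq_div_mul, Nat.mul_comm]
    · rw [mixN, hPl]
      have d1 : n % (vs.length * prodLens rest) / prodLens rest = n / prodLens rest % vs.length := by
        rw [Nat.mul_comm]
        exact Nat.mod_mul_right_div_self n (prodLens rest) vs.length
      have d2 : n % (vs.length * prodLens rest) % prodLens rest = n % prodLens rest :=
        Nat.mod_mod_of_dvd n ⟨vs.length, Nat.mul_comm _ _⟩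
      rw [d1, d2]
      simp only [List.reverse_cons, List.append_assoc]
      congr 1
      rw [PySem.List.pyGetD_natCast]

-- ===== VERDICT (by name: the statement is the Claim_ definition above) =====
theorem get_updates_at_index_spec : Claim_equal_get_updates_at_index := by
  intro index sweep _ hpre
  unfold Spec_get_updates_at_index
  cases index with
  | none => rfl
  | some i =>
    simp only [Pre_get_updates_at_index, Option.all_some, decide_eq_true_eq] at hpre
    obtain ⟨h0, hlt⟩ := hpre
    rw [prod_cast] at hlt
    set n := i.toNat with hn
    have hi : i = (n : Int) := by omega
    have hnP : n < prodLens sweep := by omega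
    have hPpos : 0 < prodLens sweep := by omega
    -- A side
    rw [get_updates_at_index, get_updates_at_index_alt]
    have hprodL : prodL (sweep.map (·.2)) = prodLens sweep := by
      simp [prodL, prodLens, List.map_map]; rfl
    have hbound : i < 0 + ((pvProd (sweep.map (·.2))).length : Int) := by
      rw [pvProd_length, hprodL]; omega
    rw [find_enum _ 0 i (by omega) hbound]
    simp only [Option.map_some, sub_zero]
    have hA : (pvProd (sweep.map (·.2))).getD n [] = mixVals n (sweep.map (·.2)) := by
      apply pvProd_getD
      rw [hprodL]; exact hnP
    rw [← hn, hA, zip_mixVals]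
    -- B side
    rw [List.foldl_reverse, hi, foldrB sweep n [] (lens_pos sweep hPpos)]
    rw [Nat.div_eq_of_lt hnP, Nat.mod_eq_of_lt hnP]
    simp
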